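-- pv_equiv track=rewrite | github.com/kinokizumi/Meta-Data-Scientist-Prep | seat_arrangement.py | minOverallAwkwardness
-- ===== SOURCE A (Python) =====
-- from collections import deque
--
-- def minOverallAwkwardness(arr):
--   # Write your code here
--   arr = sorted(arr)
--   seats = deque()
--   max_awkward = 0
--
--   while arr:
--     min_arr_l = arr.pop(0)
--     seats.appendleft(min_arr_l)
--     if arr:
--       min_arr_r = arr.pop(0)
--       seats.append(min_arr_r)
--
--     awkward = max([abs(min_arr_l - seats[1]), abs(min_arr_r - seats[-2])])
--     if max_awkward < awkward:
--       max_awkward = awkward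
--
--   return max_awkward
-- ===== SOURCE B (Python) =====
-- def minOverallAwkwardness(arr):
--   arr = sorted(arr)
--   if not arr:
--     return 0
--   result = arr[1] - arr[0]
--   for x, y in zip(arr, arr[2:]):
--     result = max(result, y - x)
--   return result
-- ===== Notes on version B (the rewrite author's own statement) =====
-- stated objective: simpler
-- what changed: B never builds the deque seating arrangement: after sorting it takes the answer directly as the maximum of arr[1]-arr[0] and the gaps arr[i+2]-arr[i], one plain scan over index pairs.
-- outside the precondition, e.g. on minOverallAwkwardness([1]): A raises IndexError, B raises IndexError; on minOverallAwkwardness([0]): A raises IndexError, B raises IndexError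
import Mathlib
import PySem

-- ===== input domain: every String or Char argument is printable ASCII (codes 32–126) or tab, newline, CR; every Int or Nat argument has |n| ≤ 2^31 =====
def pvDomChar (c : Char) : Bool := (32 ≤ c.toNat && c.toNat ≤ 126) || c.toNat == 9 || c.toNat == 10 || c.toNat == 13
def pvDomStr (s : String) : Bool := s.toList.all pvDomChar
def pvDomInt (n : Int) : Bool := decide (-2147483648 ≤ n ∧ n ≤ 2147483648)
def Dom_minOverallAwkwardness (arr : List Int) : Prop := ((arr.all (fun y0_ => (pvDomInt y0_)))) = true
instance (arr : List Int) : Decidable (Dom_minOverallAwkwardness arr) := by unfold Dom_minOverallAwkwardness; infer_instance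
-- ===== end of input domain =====

-- B replaces A's deque seating construction by a direct scan of the sorted gaps
-- arr[1]-arr[0] and arr[i+2]-arr[i] (objective: simpler; also avoids quadratic pop(0)).

-- ===== PORT A =====
-- A's while-loop: state = (remaining sorted arr, seats deque, max_awkward, the
-- (possibly stale) min_arr_r variable).  seats[1] / seats[-2] are pyGet?; the
-- `.getD 0` arm is Python's IndexError, excluded by Pre_ (it fires only for a
-- one-element input).
def minOverallAwkwardness_loop : List Int → List Int → Int → Int → Int
  | [], _, mx, _ => mx
  | l :: arr1, seats, mx, r =>
    let seats1 := l :: seats            -- seats.appendleft(min_arr_l)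
    match arr1 with
    | rr :: arr2 =>
      let seats2 := seats1 ++ [rr]      -- seats.append(min_arr_r)
      let awk := max |l - (PySem.List.pyGet? seats2 1).getD 0|
                     |rr - (PySem.List.pyGet? seats2 (-2)).getD 0|
      minOverallAwkwardness_loop arr2 seats2 (if mx < awk then awk else mx) rr
    | [] =>
      let awk := max |l - (PySem.List.pyGet? seats1 1).getD 0|
                     |r - (PySem.List.pyGet? seats1 (-2)).getD 0|   -- r is the stale min_arr_r
      minOverallAwkwardness_loop [] seats1 (if mx < awk then awk else mx) r

def minOverallAwkwardness (arr : List Int) : Int :=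
  minOverallAwkwardness_loop (PySem.List.sorted arr (fun x => x) false) [] 0 0

-- ===== PORT B =====
def minOverallAwkwardness_alt (arr : List Int) : Int :=
  let a := PySem.List.sorted arr (fun x => x) false
  if a = [] then 0
  else
    match PySem.List.pyGet? a 1, PySem.List.pyGet? a 0 with
    | some x1, some x0 =>
      (a.zip (a.drop 2)).foldl (fun res p => max res (p.2 - p.1)) (x1 - x0)
    | _, _ => 0   -- IndexError on a one-element list; excluded by Pre_

-- ===== PRECONDITION & SPEC =====
-- A (and B) raise IndexError on a one-element list (seats[1] / arr[1]); Pre_ excludes exactly that.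
def Pre_minOverallAwkwardness (arr : List Int) : Prop := arr.length ≠ 1
instance (arr : List Int) : Decidable (Pre_minOverallAwkwardness arr) := by
  unfold Pre_minOverallAwkwardness; infer_instance
def pvWitness_minOverallAwkwardness : List Int := [3, 1, 2]
def Spec_minOverallAwkwardness (arr : List Int) (out : Int) : Prop := out = minOverallAwkwardness_alt arr
instance (arr : List Int) (out : Int) : Decidable (Spec_minOverallAwkwardness arr out) := by
  unfold Spec_minOverallAwkwardness; infer_instance

-- ===== CLAIM (what is proved, stated in full; the proofs are below) =====
def Claim_equal_minOverallAwkwardness : Prop := ∀ (arr : List Int), Dom_minOverallAwkwardness arr → Pre_minOverallAwkwardness arr → Spec_minOverallAwkwardness arr (minOverallAwkwardness arr)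

-- ===== LEMMAS AND PROOFS =====

theorem pv_pyGet?_one_cons (a b : Int) (t : List Int) :
    PySem.List.pyGet? (a :: b :: t) 1 = some b := by
  simp [PySem.List.pyGet?, PySem.List.pyIdx?]

theorem pv_pyGet?_neg_two (xs : List Int) (a b : Int) :
    PySem.List.pyGet? (xs ++ [a, b]) (-2) = some a := by
  have h := PySem.List.pyGet?_neg_natCast (xs := xs ++ [a, b]) (k := 2) (by omega) (by simp)
  norm_num at h
  simpa using h

-- Loop invariant: with seats = front ++ [q, pr] headed by pl (pl = last left
-- seat, pr = last right seat = the current min_arr_r, q = the seat next to pr),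
-- A's remaining loop computes exactly B's fold over the remaining gap pairs
-- zip (pl :: pr :: rest) rest.
theorem pv_loop_eq_fold : (rest : List Int) → ∀ (front : List Int) (pl q pr mx : Int),
    (front ++ [q, pr]).head? = some pl →
    List.Pairwise (· ≤ ·) (pl :: pr :: rest) →
    q ≤ pr → pr - q ≤ mx →
    minOverallAwkwardness_loop rest (front ++ [q, pr]) mx pr
      = ((pl :: pr :: rest).zip rest).foldl (fun res p => max res (p.2 - p.1)) mx
  | [] => by
    intro front pl q pr mx _ _ _ _
    simp [minOverallAwkwardness_loop]
  | [l] => by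
    intro front pl q pr mx hhead hpw hqpr hmx
    have hpl_le : pl ≤ l := (List.pairwise_cons.mp hpw).1 l (by simp)
    -- seats1 = l :: front ++ [q, pr] = (l :: front) ++ [q, pr], and its head after l is pl
    have h1 : PySem.List.pyGet? (l :: (front ++ [q, pr])) 1 = some pl := by
      cases front with
      | nil => simp at hhead; subst hhead; exact pv_pyGet?_one_cons _ _ _
      | cons a fr => simp at hhead; subst hhead; exact pv_pyGet?_one_cons _ _ _
    have h2 : PySem.List.pyGet? (l :: (front ++ [q, pr])) (-2) = some q := by
      have : l :: (front ++ [q, pr]) = (l :: front) ++ [q, pr] := by simp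
      rw [this]; exact pv_pyGet?_neg_two _ _ _
    simp only [minOverallAwkwardness_loop, h1, h2, Option.getD_some]
    rw [abs_of_nonneg (by omega), abs_of_nonneg (by omega)]
    simp only [List.zip_cons_cons, List.zip_nil_right, List.foldl_cons, List.foldl_nil]
    simp only [max_def]; split_ifs <;> omega
  | l :: rr :: rest2 => by
    intro front pl q pr mx hhead hpw hqpr hmx
    have hpl_le : pl ≤ l := (List.pairwise_cons.mp hpw).1 l (by simp)
    have hpr_le : pr ≤ rr :=
      (List.pairwise_cons.mp (List.pairwise_cons.mp hpw).2).1 rr (by simp)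
    -- seats2 = l :: (front ++ [q, pr]) ++ [rr]
    have h1 : PySem.List.pyGet? (l :: (front ++ [q, pr]) ++ [rr]) 1 = some pl := by
      cases front with
      | nil => simp at hhead; subst hhead; exact pv_pyGet?_one_cons _ _ _
      | cons a fr => simp at hhead; subst hhead; exact pv_pyGet?_one_cons _ _ _
    have h2 : PySem.List.pyGet? (l :: (front ++ [q, pr]) ++ [rr]) (-2) = some pr := by
      have : l :: (front ++ [q, pr]) ++ [rr] = ((l :: front) ++ [q]) ++ [pr, rr] := by simp
      rw [this]; exact pv_pyGet?_neg_two _ _ _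
    simp only [minOverallAwkwardness_loop, h1, h2, Option.getD_some]
    rw [abs_of_nonneg (by omega), abs_of_nonneg (by omega)]
    have hre : l :: (front ++ [q, pr]) ++ [rr] = ((l :: front) ++ [q]) ++ [pr, rr] := by simp
    rw [hre]
    have hrec := pv_loop_eq_fold rest2 ((l :: front) ++ [q]) l pr rr
      (if mx < max (l - pl) (rr - pr) then max (l - pl) (rr - pr) else mx)
      (by simp)
      (hpw.sublist (List.Sublist.trans (List.sublist_cons_self _ _)
        (List.sublist_cons_self _ _)))
      hpr_le
      (by simp only [max_def]; split_ifs <;> omega)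
    rw [hrec]
    simp only [List.zip_cons_cons, List.foldl_cons]
    congr 1
    simp only [max_def]; split_ifs <;> omega

theorem minOverallAwkwardness_spec : Claim_equal_minOverallAwkwardness := by
  intro arr _ hpre
  unfold Spec_minOverallAwkwardness minOverallAwkwardness minOverallAwkwardness_alt
  have hpw := PySem.List.sorted_pairwise (xs := arr) (key := fun x : Int => x)
  have hlen : (PySem.List.sorted arr (fun x => x) false).length = arr.length :=
    PySem.List.length_sorted ..
  cases hs : PySem.List.sorted arr (fun x => x) false with
  | nil => simp [minOverallAwkwardness_loop]
  | cons x0 tl =>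
    cases tl with
    | nil =>
      exfalso
      rw [hs] at hlen
      exact hpre (by simpa using hlen.symm)
    | cons x1 rest =>
      rw [hs] at hpw
      have h01 : x0 ≤ x1 := (List.pairwise_cons.mp hpw).1 x1 (by simp)
      -- first loop iteration: seats becomes [x0, x1]
      have h1 : PySem.List.pyGet? [x0, x1] 1 = some x1 := pv_pyGet?_one_cons _ _ _
      have h2 : PySem.List.pyGet? [x0, x1] (-2) = some x0 := pv_pyGet?_neg_two [] _ _
      simp only [minOverallAwkwardness_loop, List.singleton_append, h1, h2, Option.getD_some]
      -- A's first awkwardness is max |x0-x1| |x1-x0| = x1-x0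
      rw [abs_sub_comm x0 x1, abs_of_nonneg (by omega), max_self]
      have hmx : (if (0:Int) < x1 - x0 then x1 - x0 else 0) = x1 - x0 := by omega
      rw [hmx]
      have hloop := pv_loop_eq_fold rest [] x0 x0 x1 (x1 - x0) (by simp) hpw h01 le_rfl
      have hseats : ([] : List Int) ++ [x0, x1] = [x0, x1] := by simp
      rw [hseats] at hloop
      rw [hloop]
      -- B side
      simp only [if_neg (by simp : ¬(x0 :: x1 :: rest = [])), pv_pyGet?_one_cons,
        PySem.List.pyGet?_zero_cons, List.drop_succ_cons, List.drop_zero]
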